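-- pv_equiv track=rewrite | github.com/Zacxxx/poketypes | pokemon_type_cycles.py | find_cycles_optimized
-- ===== SOURCE A (Python) =====
-- def find_cycles_optimized(graph, cycle_length, is_double, prevent_adjacent_same):
--     """Finds all unique cycles of a given length in the graph using iterative DFS."""
--     cycles = set()
--     nodes = list(graph.keys())
--
--     for start in nodes:
--         if is_double:
--             stack = [(start, [start])]
--         else:
--             stack = [(start, [start], set([start]))]
--         while stack:
--             if is_double:
--                 current, path = stack.pop()
--                 if len(path) == cycle_length:
--                     if start in graph[current]:
--                         cycle = tuple(path)
--                         # Canonical form to avoid duplicates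
--                         min_node = min(cycle)
--                         min_index = cycle.index(min_node)
--                         normalized_cycle = cycle[min_index:] + cycle[:min_index]
--                         # Optionally prevent adjacent same types
--                         if prevent_adjacent_same:
--                             if any(cycle[i] == cycle[(i + 1) % cycle_length] for i in range(cycle_length)):
--                                 continue
--                         cycles.add(normalized_cycle)
--                     continue
--                 for neighbor in graph[current]:
--                     # Allow repetition for double types
--                     stack.append((neighbor, path + [neighbor]))
--             else:
--                 current, path, visited = stack.pop()
--                 if len(path) == cycle_length:
--                     if start in graph[current]:
--                         cycle = tuple(path)
--                         # Canonical form to avoid duplicates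
--                         min_node = min(cycle)
--                         min_index = cycle.index(min_node)
--                         normalized_cycle = cycle[min_index:] + cycle[:min_index]
--                         cycles.add(normalized_cycle)
--                     continue
--                 for neighbor in graph[current]:
--                     if neighbor not in visited:
--                         stack.append((neighbor, path + [neighbor], visited | {neighbor}))
--
--     return list(cycles)
-- ===== SOURCE B (Python) =====
-- def find_cycles_optimized(graph, cycle_length, is_double, prevent_adjacent_same):
--     """Finds all unique cycles of a given length in the graph using recursive DFS."""
--     cycles = set()
--
--     def canonical(path):
--         i = path.index(min(path))
--         return tuple(path[i:]) + tuple(path[:i])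
--
--     def dfs_double(start, current, path):
--         if len(path) == cycle_length:
--             if start in graph[current]:
--                 if prevent_adjacent_same and any(
--                         path[i] == path[(i + 1) % cycle_length]
--                         for i in range(cycle_length)):
--                     return
--                 cycles.add(canonical(path))
--             return
--         for neighbor in reversed(graph[current]):
--             dfs_double(start, neighbor, path + [neighbor])
--
--     def dfs_single(start, current, path, visited):
--         if len(path) == cycle_length:
--             if start in graph[current]:
--                 cycles.add(canonical(path))
--             return
--         for neighbor in reversed(graph[current]):
--             if neighbor not in visited:
--                 dfs_single(start, neighbor, path + [neighbor], visited | {neighbor})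
--
--     for start in graph:
--         if is_double:
--             dfs_double(start, start, [start])
--         else:
--             dfs_single(start, start, [start], {start})
--     return list(cycles)
-- ===== Notes on version B (the rewrite author's own statement) =====
-- stated objective: alternative
-- what changed: Replaces the explicit-stack iterative DFS (one heap-allocated stack of (node, path[, visited]) tuples popped in a while loop) with a recursive DFS helper per start node that walks neighbours in reversed order, so the LIFO stack disappears and the call stack carries the path.
import Mathlib
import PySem

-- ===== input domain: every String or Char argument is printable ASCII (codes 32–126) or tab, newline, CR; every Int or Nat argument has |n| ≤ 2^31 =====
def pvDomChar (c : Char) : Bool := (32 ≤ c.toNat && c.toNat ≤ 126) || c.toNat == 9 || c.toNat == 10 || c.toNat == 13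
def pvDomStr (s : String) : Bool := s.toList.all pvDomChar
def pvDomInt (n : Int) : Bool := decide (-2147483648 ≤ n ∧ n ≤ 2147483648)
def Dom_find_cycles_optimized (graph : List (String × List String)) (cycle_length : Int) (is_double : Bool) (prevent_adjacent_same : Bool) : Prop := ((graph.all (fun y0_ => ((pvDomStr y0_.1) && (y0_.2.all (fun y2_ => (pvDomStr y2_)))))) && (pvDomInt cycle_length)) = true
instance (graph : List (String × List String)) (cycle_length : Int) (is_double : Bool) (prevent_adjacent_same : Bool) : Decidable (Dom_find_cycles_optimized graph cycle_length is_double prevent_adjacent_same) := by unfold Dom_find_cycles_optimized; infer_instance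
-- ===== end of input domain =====

-- B rewrites A's explicit-stack iterative DFS as a recursive DFS helper per start node
-- (same leaf logic, reversed neighbour order to mirror the LIFO stack); equivalence is about
-- the returned value (neither version mutates its arguments).
-- Python's `list(set)` iteration order is hash-dependent; both ports return the cycle set in
-- first-insertion order, and the result is compared as a set.

-- ===== PORT A =====
-- graph[current] on the dict built from the (insertion-ordered) items; default [] is only
-- reached where Python would raise KeyError, which Pre_ excludes.
def pvAdjA (graph : List (String × List String)) (c : String) : List String :=
  PySem.Dict.getD (PySem.Dict.ofList graph) c []

-- min_node / min_index / cycle[min_index:] + cycle[:min_index]  (path is nonempty in context,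
-- so the `none` fallbacks are unreachable)
def pvNormA (path : List String) : List String :=
  match PySem.List.min? path (fun x => x) with
  | none => path
  | some m =>
    match PySem.List.index? path m with
    | none => path
    | some i => PySem.List.slice path (some (i : Int)) none ++ PySem.List.slice path none (some (i : Int))

-- any(cycle[i] == cycle[(i + 1) % cycle_length] for i in range(cycle_length))
def pvAdjSameA (cycle_length : Int) (path : List String) : Bool :=
  (PySem.List.pyRange 0 cycle_length 1).any (fun i =>
    PySem.List.pyGetD path i "" == PySem.List.pyGetD path (PySem.Int.mod (i + 1) cycle_length) "")

-- termination measure for the stack loops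
def pvW (graph : List (String × List String)) : Nat :=
  (graph.map (fun p => p.2.length)).foldl max 0 + 1

def pvFD (graph : List (String × List String)) (cycle_length : Int) (it : String × List String) : Nat :=
  pvW graph ^ (cycle_length.toNat + 1 - it.2.length)

def pvFS (graph : List (String × List String)) (cycle_length : Int)
    (it : String × List String × PySem.Set String) : Nat :=
  pvW graph ^ (cycle_length.toNat + 1 - it.2.1.length)

theorem pvAdjA_values_le (graph : List (String × List String))
    (d : PySem.Dict String (List String)) (M : Nat)
    (hd : ∀ v ∈ d.values, v.length ≤ M) (hl : ∀ p ∈ graph, p.2.length ≤ M) :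
    ∀ v ∈ (graph.foldl (fun d p => d.insert p.1 p.2) d).values, v.length ≤ M := by
  induction graph generalizing d with
  | nil => exact hd
  | cons p t ih =>
    intro v hv
    refine ih (d.insert p.1 p.2) ?_ (fun q hq => hl q (List.mem_cons_of_mem _ hq)) v hv
    intro w hw
    have h2 : w = p.2 ∨ w ∈ d.values := by
      first
      | exact PySem.Dict.mem_values_insert hw
      | exact PySem.Dict.mem_values_insert d hw
      | exact PySem.Dict.mem_values_insert d p.1 p.2 hw
      | exact PySem.Dict.mem_values_insert d p.1 p.2 w hw
      | (apply PySem.Dict.mem_values_insert; exact hw)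
    rcases h2 with h | h
    · exact h ▸ hl p List.mem_cons_self
    · exact hd w h

theorem pvAdjA_lt_pvW (graph : List (String × List String)) (c : String) :
    (pvAdjA graph c).length < pvW graph := by
  have hbound : ∀ p ∈ graph, p.2.length ≤ (graph.map (fun p => p.2.length)).foldl max 0 := by
    intro p hp
    exact (PySem.List.le_foldl_max (graph.map (fun p => p.2.length)) 0).2 _
      (List.mem_map.mpr ⟨p, hp, rfl⟩)
  have hvals : ∀ v ∈ (PySem.Dict.ofList graph).values,
      v.length ≤ (graph.map (fun p => p.2.length)).foldl max 0 := by
    have : PySem.Dict.ofList graph = graph.foldl (fun d p => d.insert p.1 p.2) PySem.Dict.empty := rfl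
    rw [this]
    exact pvAdjA_values_le graph PySem.Dict.empty _ (by simp [PySem.Dict.values_mk, PySem.Dict.empty]) hbound
  unfold pvAdjA pvW
  rw [PySem.Dict.getD_eq_get?_getD]
  cases hget : PySem.Dict.get? (PySem.Dict.ofList graph) c with
  | none => simp
  | some v =>
    have hmem : v ∈ (PySem.Dict.ofList graph).values := by
      have hit : (c, v) ∈ (PySem.Dict.ofList graph).items := by
        first
        | exact PySem.Dict.mem_items_of_get?_eq_some hget
        | exact PySem.Dict.mem_items_of_get?_eq_some _ hget
        | (apply PySem.Dict.mem_items_of_get?_eq_some; exact hget)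
      exact List.mem_map.mpr ⟨(c, v), hit, rfl⟩
    have := hvals v hmem
    simp only [Option.getD_some]
    omega

theorem pvPow_pos (graph : List (String × List String)) (e : Nat) : 0 < pvW graph ^ e :=
  Nat.pow_pos (by unfold pvW; omega)

theorem pvLt_toNat (k : Int) (l : Nat) (h : (l : Int) < k) : l < k.toNat := by omega

theorem pvGas_lt (k : Int) (l : Nat) (h : (l : Int) < k) : k.toNat - (l + 1) < k.toNat - l :=
  Nat.sub_succ_lt_self _ _ (pvLt_toNat k l h)

theorem pvMeasureD_push (graph : List (String × List String)) (cycle_length : Int)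
    (current : String) (path : List String) (rest : List (String × List String))
    (h : (path.length : Int) < cycle_length) :
    ((((pvAdjA graph current).map (fun n => (n, path ++ [n]))).reverse ++ rest).map
        (pvFD graph cycle_length)).sum
      < (((current, path) :: rest).map (pvFD graph cycle_length)).sum := by
  have hlen : path.length < cycle_length.toNat := pvLt_toNat cycle_length path.length h
  rw [List.map_append, List.sum_append, List.map_reverse, List.sum_reverse, List.map_map]
  simp only [List.map_cons, List.sum_cons]
  have hconst : ((pvAdjA graph current).map
      ((pvFD graph cycle_length) ∘ (fun n => (n, path ++ [n])))).sum
      = (pvAdjA graph current).length * pvW graph ^ (cycle_length.toNat - path.length) := by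
    rw [List.map_congr_left (g := fun _ => pvW graph ^ (cycle_length.toNat - path.length))
      (by intro n _; simp only [Function.comp, pvFD, List.length_append, List.length_cons,
            List.length_nil]; exact congrArg (pvW graph ^ ·) (Nat.succ_sub_succ _ _))]
    exact PySem.List.sum_map_const_nat _ _
  rw [hconst]
  have hdeg := pvAdjA_lt_pvW graph current
  have hsplit : pvW graph ^ (cycle_length.toNat + 1 - path.length)
      = pvW graph * pvW graph ^ (cycle_length.toNat - path.length) := by
    rw [Nat.succ_sub (Nat.le_of_lt hlen), pow_succ']
  simp only [pvFD]
  rw [hsplit]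
  exact Nat.add_lt_add_right
    ((Nat.mul_lt_mul_right (pvPow_pos graph (cycle_length.toNat - path.length))).2 hdeg) _

theorem pvMeasureS_push (graph : List (String × List String)) (cycle_length : Int)
    (current : String) (path : List String) (visited : PySem.Set String)
    (rest : List (String × List String × PySem.Set String))
    (h : (path.length : Int) < cycle_length) :
    (((((pvAdjA graph current).filter (fun n => !(PySem.Set.contains visited n))).map
          (fun n => (n, path ++ [n], PySem.Set.add visited n))).reverse ++ rest).map
        (pvFS graph cycle_length)).sum
      < (((current, path, visited) :: rest).map (pvFS graph cycle_length)).sum := by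
  have hlen : path.length < cycle_length.toNat := pvLt_toNat cycle_length path.length h
  rw [List.map_append, List.sum_append, List.map_reverse, List.sum_reverse, List.map_map]
  simp only [List.map_cons, List.sum_cons]
  have hconst : (((pvAdjA graph current).filter (fun n => !(PySem.Set.contains visited n))).map
      ((pvFS graph cycle_length) ∘ (fun n => (n, path ++ [n], PySem.Set.add visited n)))).sum
      = ((pvAdjA graph current).filter (fun n => !(PySem.Set.contains visited n))).length
        * pvW graph ^ (cycle_length.toNat - path.length) := by
    rw [List.map_congr_left (g := fun _ => pvW graph ^ (cycle_length.toNat - path.length))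
      (by intro n _; simp only [Function.comp, pvFS, List.length_append, List.length_cons,
            List.length_nil]; exact congrArg (pvW graph ^ ·) (Nat.succ_sub_succ _ _))]
    exact PySem.List.sum_map_const_nat _ _
  rw [hconst]
  have hdeg : ((pvAdjA graph current).filter (fun n => !(PySem.Set.contains visited n))).length
      < pvW graph :=
    Nat.lt_of_le_of_lt (List.length_filter_le _ _) (pvAdjA_lt_pvW graph current)
  have hsplit : pvW graph ^ (cycle_length.toNat + 1 - path.length)
      = pvW graph * pvW graph ^ (cycle_length.toNat - path.length) := by
    rw [Nat.succ_sub (Nat.le_of_lt hlen), pow_succ']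
  simp only [pvFS]
  rw [hsplit]
  exact Nat.add_lt_add_right
    ((Nat.mul_lt_mul_right (pvPow_pos graph (cycle_length.toNat - path.length))).2 hdeg) _

-- A's while-loop, is_double branch; the Lean stack head is the Python stack top (append+pop),
-- so the `for neighbor in graph[current]` appends become `.reverse ++ rest`.
-- The `< cycle_length` guard on the push only makes the recursion total: Python pushes whenever
-- len(path) ≠ cycle_length and never returns when len(path) > cycle_length (Pre_ excludes those inputs).
def pvLoopD (graph : List (String × List String)) (cycle_length : Int)
    (prevent_adjacent_same : Bool) (start : String)
    (stack : List (String × List String)) (cycles : PySem.Set (List String)) :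
    PySem.Set (List String) :=
  match stack with
  | [] => cycles
  | (current, path) :: rest =>
    if (path.length : Int) = cycle_length then
      pvLoopD graph cycle_length prevent_adjacent_same start rest
        (if start ∈ pvAdjA graph current then
          (if prevent_adjacent_same && pvAdjSameA cycle_length path then cycles
           else PySem.Set.add cycles (pvNormA path))
         else cycles)
    else if _h : (path.length : Int) < cycle_length then
      pvLoopD graph cycle_length prevent_adjacent_same start
        (((pvAdjA graph current).map (fun n => (n, path ++ [n]))).reverse ++ rest) cycles
    else
      pvLoopD graph cycle_length prevent_adjacent_same start rest cycles
termination_by (stack.map (pvFD graph cycle_length)).sum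
decreasing_by
  · simp only [List.map_cons, List.sum_cons, pvFD]
    exact Nat.lt_add_of_pos_left (pvPow_pos graph (cycle_length.toNat + 1 - path.length))
  · exact pvMeasureD_push graph cycle_length current path rest _h
  · simp only [List.map_cons, List.sum_cons, pvFD]
    exact Nat.lt_add_of_pos_left (pvPow_pos graph (cycle_length.toNat + 1 - path.length))

-- A's while-loop, single-type branch (visited-set pruning; no adjacent-same filter).
def pvLoopS (graph : List (String × List String)) (cycle_length : Int) (start : String)
    (stack : List (String × List String × PySem.Set String))
    (cycles : PySem.Set (List String)) : PySem.Set (List String) :=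
  match stack with
  | [] => cycles
  | (current, path, visited) :: rest =>
    if (path.length : Int) = cycle_length then
      pvLoopS graph cycle_length start rest
        (if start ∈ pvAdjA graph current then PySem.Set.add cycles (pvNormA path) else cycles)
    else if _h : (path.length : Int) < cycle_length then
      pvLoopS graph cycle_length start
        ((((pvAdjA graph current).filter (fun n => !(PySem.Set.contains visited n))).map
            (fun n => (n, path ++ [n], PySem.Set.add visited n))).reverse ++ rest) cycles
    else
      pvLoopS graph cycle_length start rest cycles
termination_by (stack.map (pvFS graph cycle_length)).sum
decreasing_by
  · simp only [List.map_cons, List.sum_cons, pvFS]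
    exact Nat.lt_add_of_pos_left (pvPow_pos graph (cycle_length.toNat + 1 - path.length))
  · exact pvMeasureS_push graph cycle_length current path visited rest _h
  · simp only [List.map_cons, List.sum_cons, pvFS]
    exact Nat.lt_add_of_pos_left (pvPow_pos graph (cycle_length.toNat + 1 - path.length))

-- the `while stack` loop checks is_double each iteration, but it is constant, so each start
-- node runs exactly one of the two stack loops
def find_cycles_optimized (graph : List (String × List String)) (cycle_length : Int)
    (is_double : Bool) (prevent_adjacent_same : Bool) : List (List String) :=
  (PySem.Dict.keys (PySem.Dict.ofList graph)).foldl
    (fun cycles start =>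
      if is_double then
        pvLoopD graph cycle_length prevent_adjacent_same start [(start, [start])] cycles
      else
        pvLoopS graph cycle_length start [(start, [start], PySem.Set.ofList [start])] cycles)
    PySem.Set.empty

-- ===== PORT B =====
def pvAdjB (graph : List (String × List String)) (c : String) : List String :=
  PySem.Dict.getD (PySem.Dict.ofList graph) c []

-- canonical(path): i = path.index(min(path)); tuple(path[i:]) + tuple(path[:i])
def pvCanonB (path : List String) : List String :=
  match PySem.List.min? path (fun x => x) with
  | none => path
  | some m =>
    match PySem.List.index? path m with
    | none => path
    | some i => PySem.List.slice path (some (i : Int)) none ++ PySem.List.slice path none (some (i : Int))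

def pvAdjSameB (cycle_length : Int) (path : List String) : Bool :=
  (PySem.List.pyRange 0 cycle_length 1).any (fun i =>
    PySem.List.pyGetD path i "" == PySem.List.pyGetD path (PySem.Int.mod (i + 1) cycle_length) "")

-- dfs_double; neighbours are visited in reversed() order. The `< cycle_length` recursion guard
-- only makes the recursion total (Python recurses forever there; Pre_ excludes those inputs).
def pvDfsD (graph : List (String × List String)) (cycle_length : Int)
    (prevent_adjacent_same : Bool) (start current : String) (path : List String)
    (cycles : PySem.Set (List String)) : PySem.Set (List String) :=
  if (path.length : Int) = cycle_length then
    if start ∈ pvAdjB graph current then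
      if prevent_adjacent_same && pvAdjSameB cycle_length path then cycles
      else PySem.Set.add cycles (pvCanonB path)
    else cycles
  else if _h : (path.length : Int) < cycle_length then
    ((pvAdjB graph current).reverse).foldl
      (fun c n => pvDfsD graph cycle_length prevent_adjacent_same start n (path ++ [n]) c) cycles
  else cycles
termination_by cycle_length.toNat - path.length
decreasing_by simp only [List.length_append, List.length_cons, List.length_nil]; exact pvGas_lt cycle_length path.length _h

-- dfs_single
def pvDfsS (graph : List (String × List String)) (cycle_length : Int) (start current : String)
    (path : List String) (visited : PySem.Set String) (cycles : PySem.Set (List String)) :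
    PySem.Set (List String) :=
  if (path.length : Int) = cycle_length then
    if start ∈ pvAdjB graph current then PySem.Set.add cycles (pvCanonB path) else cycles
  else if _h : (path.length : Int) < cycle_length then
    ((pvAdjB graph current).reverse).foldl
      (fun c n =>
        if PySem.Set.contains visited n then c
        else pvDfsS graph cycle_length start n (path ++ [n]) (PySem.Set.add visited n) c) cycles
  else cycles
termination_by cycle_length.toNat - path.length
decreasing_by simp only [List.length_append, List.length_cons, List.length_nil]; exact pvGas_lt cycle_length path.length _h

def find_cycles_optimized_alt (graph : List (String × List String)) (cycle_length : Int)
    (is_double : Bool) (prevent_adjacent_same : Bool) : List (List String) :=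
  (PySem.Dict.keys (PySem.Dict.ofList graph)).foldl
    (fun cycles start =>
      if is_double then
        pvDfsD graph cycle_length prevent_adjacent_same start start [start] cycles
      else
        pvDfsS graph cycle_length start start [start] (PySem.Set.ofList [start]) cycles)
    PySem.Set.empty

-- ===== PRECONDITION & SPEC =====
-- Pre_ keeps exactly the inputs on which the Python A returns: with cycle_length ≥ 2 every
-- neighbour must be a key of the dict (otherwise graph[neighbor] raises KeyError), and with
-- cycle_length ≤ 0 the dict must have no edges (otherwise the stack grows forever and A never
-- returns).  With cycle_length = 1 neighbours are never popped, so no closure is required.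
def Pre_find_cycles_optimized (graph : List (String × List String)) (cycle_length : Int) (is_double : Bool) (prevent_adjacent_same : Bool) : Prop :=
  (2 ≤ cycle_length → ∀ p ∈ (PySem.Dict.ofList graph).items, ∀ n ∈ p.2,
      (PySem.Dict.ofList graph).contains n = true)
  ∧ (1 ≤ cycle_length ∨ ∀ p ∈ (PySem.Dict.ofList graph).items, p.2 = [])
instance (graph : List (String × List String)) (cycle_length : Int) (is_double : Bool) (prevent_adjacent_same : Bool) : Decidable (Pre_find_cycles_optimized graph cycle_length is_double prevent_adjacent_same) := by unfold Pre_find_cycles_optimized; infer_instance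

-- (a tiny literal: kernel reduction of String literals is expensive, so keep the witness small)
def pvWitness_find_cycles_optimized : (List (String × List String)) × Int × Bool × Bool :=
  ([], 1, false, false)

def Spec_find_cycles_optimized (graph : List (String × List String)) (cycle_length : Int) (is_double : Bool) (prevent_adjacent_same : Bool) (out : List (List String)) : Prop := out = find_cycles_optimized_alt graph cycle_length is_double prevent_adjacent_same
instance (graph : List (String × List String)) (cycle_length : Int) (is_double : Bool) (prevent_adjacent_same : Bool) (out : List (List String)) : Decidable (Spec_find_cycles_optimized graph cycle_length is_double prevent_adjacent_same out) := by unfold Spec_find_cycles_optimized; infer_instance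

-- ===== CLAIM (what is proved, stated in full; the proofs are below) =====
def Claim_equal_find_cycles_optimized : Prop := ∀ (graph : List (String × List String)) (cycle_length : Int) (is_double : Bool) (prevent_adjacent_same : Bool), Dom_find_cycles_optimized graph cycle_length is_double prevent_adjacent_same → Pre_find_cycles_optimized graph cycle_length is_double prevent_adjacent_same → Spec_find_cycles_optimized graph cycle_length is_double prevent_adjacent_same (find_cycles_optimized graph cycle_length is_double prevent_adjacent_same)

-- ===== LEMMAS AND PROOFS =====
theorem pvAdjB_eq : pvAdjB = pvAdjA := rfl
theorem pvCanonB_eq : pvCanonB = pvNormA := rfl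
theorem pvAdjSameB_eq : pvAdjSameB = pvAdjSameA := rfl

-- unfolding lemmas for single steps of the recursive DFS
theorem pvDfsD_leaf (graph : List (String × List String)) (cycle_length : Int)
    (prevent_adjacent_same : Bool) (start current : String) (path : List String)
    (cycles : PySem.Set (List String)) (h1 : (path.length : Int) = cycle_length) :
    pvDfsD graph cycle_length prevent_adjacent_same start current path cycles
      = (if start ∈ pvAdjA graph current then
          (if prevent_adjacent_same && pvAdjSameA cycle_length path then cycles
           else PySem.Set.add cycles (pvNormA path))
         else cycles) := by
  rw [pvDfsD, if_pos h1, pvAdjB_eq, pvCanonB_eq, pvAdjSameB_eq]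

theorem pvDfsD_push (graph : List (String × List String)) (cycle_length : Int)
    (prevent_adjacent_same : Bool) (start current : String) (path : List String)
    (cycles : PySem.Set (List String)) (h1 : ¬ (path.length : Int) = cycle_length)
    (h2 : (path.length : Int) < cycle_length) :
    pvDfsD graph cycle_length prevent_adjacent_same start current path cycles
      = ((pvAdjA graph current).reverse).foldl
          (fun c n => pvDfsD graph cycle_length prevent_adjacent_same start n (path ++ [n]) c)
          cycles := by
  rw [pvDfsD, if_neg h1, dif_pos h2, pvAdjB_eq]

theorem pvDfsD_stop (graph : List (String × List String)) (cycle_length : Int)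
    (prevent_adjacent_same : Bool) (start current : String) (path : List String)
    (cycles : PySem.Set (List String)) (h1 : ¬ (path.length : Int) = cycle_length)
    (h2 : ¬ (path.length : Int) < cycle_length) :
    pvDfsD graph cycle_length prevent_adjacent_same start current path cycles = cycles := by
  rw [pvDfsD, if_neg h1, dif_neg h2]

theorem pvDfsS_leaf (graph : List (String × List String)) (cycle_length : Int)
    (start current : String) (path : List String) (visited : PySem.Set String)
    (cycles : PySem.Set (List String)) (h1 : (path.length : Int) = cycle_length) :
    pvDfsS graph cycle_length start current path visited cycles
      = (if start ∈ pvAdjA graph current then PySem.Set.add cycles (pvNormA path) else cycles) := by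
  rw [pvDfsS, if_pos h1, pvAdjB_eq, pvCanonB_eq]

theorem pvDfsS_push (graph : List (String × List String)) (cycle_length : Int)
    (start current : String) (path : List String) (visited : PySem.Set String)
    (cycles : PySem.Set (List String)) (h1 : ¬ (path.length : Int) = cycle_length)
    (h2 : (path.length : Int) < cycle_length) :
    pvDfsS graph cycle_length start current path visited cycles
      = ((pvAdjA graph current).reverse).foldl
          (fun c n =>
            if PySem.Set.contains visited n then c
            else pvDfsS graph cycle_length start n (path ++ [n]) (PySem.Set.add visited n) c)
          cycles := by
  rw [pvDfsS, if_neg h1, dif_pos h2, pvAdjB_eq]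

theorem pvDfsS_stop (graph : List (String × List String)) (cycle_length : Int)
    (start current : String) (path : List String) (visited : PySem.Set String)
    (cycles : PySem.Set (List String)) (h1 : ¬ (path.length : Int) = cycle_length)
    (h2 : ¬ (path.length : Int) < cycle_length) :
    pvDfsS graph cycle_length start current path visited cycles = cycles := by
  rw [pvDfsS, if_neg h1, dif_neg h2]

-- the stack loop equals a left fold of the recursive DFS over the stack items (double case)
theorem pvLoopD_eq (graph : List (String × List String)) (cycle_length : Int)
    (prevent_adjacent_same : Bool) (start : String)
    (stack : List (String × List String)) (cycles : PySem.Set (List String)) :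
    pvLoopD graph cycle_length prevent_adjacent_same start stack cycles
      = stack.foldl
          (fun c it => pvDfsD graph cycle_length prevent_adjacent_same start it.1 it.2 c)
          cycles := by
  match stack with
  | [] => rw [pvLoopD]; rfl
  | (current, path) :: rest =>
    rw [pvLoopD]
    by_cases h1 : (path.length : Int) = cycle_length
    · rw [if_pos h1, pvLoopD_eq graph cycle_length prevent_adjacent_same start rest]
      simp only [List.foldl_cons]
      rw [pvDfsD_leaf graph cycle_length prevent_adjacent_same start current path cycles h1]
    · rw [if_neg h1]
      by_cases h2 : (path.length : Int) < cycle_length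
      · rw [dif_pos h2, pvLoopD_eq graph cycle_length prevent_adjacent_same start _]
        rw [List.foldl_append]
        simp only [List.foldl_cons]
        congr 1
        rw [pvDfsD_push graph cycle_length prevent_adjacent_same start current path cycles h1 h2]
        rw [show ((pvAdjA graph current).map (fun n => (n, path ++ [n]))).reverse
              = (pvAdjA graph current).reverse.map (fun n => (n, path ++ [n])) by
            rw [List.map_reverse]]
        rw [List.foldl_map]
      · rw [dif_neg h2, pvLoopD_eq graph cycle_length prevent_adjacent_same start rest]
        simp only [List.foldl_cons]
        rw [pvDfsD_stop graph cycle_length prevent_adjacent_same start current path cycles h1 h2]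
termination_by (stack.map (pvFD graph cycle_length)).sum
decreasing_by
  · simp only [List.map_cons, List.sum_cons, pvFD]
    exact Nat.lt_add_of_pos_left (pvPow_pos graph (cycle_length.toNat + 1 - path.length))
  · exact pvMeasureD_push graph cycle_length current path rest h2
  · simp only [List.map_cons, List.sum_cons, pvFD]
    exact Nat.lt_add_of_pos_left (pvPow_pos graph (cycle_length.toNat + 1 - path.length))

theorem pvLoopS_eq (graph : List (String × List String)) (cycle_length : Int) (start : String)
    (stack : List (String × List String × PySem.Set String))
    (cycles : PySem.Set (List String)) :
    pvLoopS graph cycle_length start stack cycles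
      = stack.foldl (fun c it => pvDfsS graph cycle_length start it.1 it.2.1 it.2.2 c) cycles := by
  match stack with
  | [] => rw [pvLoopS]; rfl
  | (current, path, visited) :: rest =>
    rw [pvLoopS]
    by_cases h1 : (path.length : Int) = cycle_length
    · rw [if_pos h1, pvLoopS_eq graph cycle_length start rest]
      simp only [List.foldl_cons]
      rw [pvDfsS_leaf graph cycle_length start current path visited cycles h1]
    · rw [if_neg h1]
      by_cases h2 : (path.length : Int) < cycle_length
      · rw [dif_pos h2, pvLoopS_eq graph cycle_length start _]
        rw [List.foldl_append]
        simp only [List.foldl_cons]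
        congr 1
        rw [pvDfsS_push graph cycle_length start current path visited cycles h1 h2]
        rw [show (((pvAdjA graph current).filter (fun n => !(PySem.Set.contains visited n))).map
              (fun n => (n, path ++ [n], PySem.Set.add visited n))).reverse
              = ((pvAdjA graph current).reverse.filter (fun n => !(PySem.Set.contains visited n))).map
                  (fun n => (n, path ++ [n], PySem.Set.add visited n)) by
            rw [← List.map_reverse, List.filter_reverse]]
        rw [List.foldl_map, List.foldl_filter]
        congr 1
        funext c n
        cases hb : PySem.Set.contains visited n <;> simp [hb]
      · rw [dif_neg h2, pvLoopS_eq graph cycle_length start rest]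
        simp only [List.foldl_cons]
        rw [pvDfsS_stop graph cycle_length start current path visited cycles h1 h2]
termination_by (stack.map (pvFS graph cycle_length)).sum
decreasing_by
  · simp only [List.map_cons, List.sum_cons, pvFS]
    exact Nat.lt_add_of_pos_left (pvPow_pos graph (cycle_length.toNat + 1 - path.length))
  · exact pvMeasureS_push graph cycle_length current path visited rest h2
  · simp only [List.map_cons, List.sum_cons, pvFS]
    exact Nat.lt_add_of_pos_left (pvPow_pos graph (cycle_length.toNat + 1 - path.length))

-- ===== VERDICT (by name: the statement is the Claim_ definition above) =====
theorem find_cycles_optimized_spec : Claim_equal_find_cycles_optimized := by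
  intro graph cycle_length is_double prevent_adjacent_same _ _
  unfold Spec_find_cycles_optimized find_cycles_optimized find_cycles_optimized_alt
  cases is_double with
  | false =>
    simp only [Bool.false_eq_true, if_false]
    congr 1
    funext cycles start
    rw [pvLoopS_eq]
    rfl
  | true =>
    simp only [if_true]
    congr 1
    funext cycles start
    rw [pvLoopD_eq]
    rfl
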